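-- pv_equiv track=rewrite | github.com/MrBrantCode/unitest_baseline | mut_generate/mist_train_cf/cf_21899/solution.py | identify_palindromes
-- ===== SOURCE A (Python) =====
-- def identify_palindromes(lst):
--     def is_palindrome(string):
--         # Remove punctuation marks and spaces from the string
--         clean_string = ''.join(char for char in string if char.isalnum())
--         # Convert the string to lowercase
--         lowercase_string = clean_string.lower()
--         # Check if the lowercase string is equal to its reverse
--         return lowercase_string == lowercase_string[::-1]
--
--     # Create an empty list to store the palindromes
--     palindromes = []
--     # Iterate over each string in the list
--     for string in lst:
--         # Check if the string is a palindrome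
--         if is_palindrome(string):
--             # If it is, add it to the list of palindromes
--             palindromes.append(string)
--     # Return the list of palindromes
--     return palindromes
-- ===== SOURCE B (Python) =====
-- def identify_palindromes(lst):
--     out = []
--     for s in lst:
--         buf = [c.lower() for c in s if c.isalnum()]
--         i, j = 0, len(buf) - 1
--         ok = True
--         while i < j:
--             if buf[i] != buf[j]:
--                 ok = False
--                 break
--             i += 1
--             j -= 1
--         if ok:
--             out.append(s)
--     return out
-- ===== Notes on version B (the rewrite author's own statement) =====
-- stated objective: alternative
-- what changed: The inner palindrome test no longer builds a reversed copy and compares whole strings: B builds the normalized buffer once and runs a two-pointer scan with converging indices that exits early on the first mismatch.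
import Mathlib
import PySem

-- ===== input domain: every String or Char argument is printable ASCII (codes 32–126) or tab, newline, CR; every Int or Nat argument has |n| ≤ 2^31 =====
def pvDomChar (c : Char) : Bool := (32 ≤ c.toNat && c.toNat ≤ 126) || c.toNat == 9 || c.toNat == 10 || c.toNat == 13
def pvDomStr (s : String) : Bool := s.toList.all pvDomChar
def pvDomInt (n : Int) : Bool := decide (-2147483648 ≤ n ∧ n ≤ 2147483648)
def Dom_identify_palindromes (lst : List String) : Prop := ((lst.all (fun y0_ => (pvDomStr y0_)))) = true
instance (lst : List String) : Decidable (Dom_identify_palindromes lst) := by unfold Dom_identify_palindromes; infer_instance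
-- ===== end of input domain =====

-- B replaces A's build-reversed-copy-and-compare palindrome test with a two-pointer scan
-- over a prebuilt normalized buffer (early exit on first mismatch); objective: alternative.

-- ===== PORT A =====
-- is_palindrome of A: filter isalnum, lowercase, compare with the [::-1] slice
def pvLow (s : String) : String :=
  -- clean_string = ''.join(char for char in string if char.isalnum()); lowercase_string = clean_string.lower()
  PySem.Str.lower (String.ofList (s.toList.filter (fun c => PySem.Chars.isalnum c)))

def pvIsPalinA (s : String) : Bool :=
  some (pvLow s) == PySem.Str.slice? (pvLow s) none none (-1)

def identify_palindromes (lst : List String) : List String :=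
  lst.foldl (fun palindromes s => if pvIsPalinA s then palindromes ++ [s] else palindromes) []

-- ===== PORT B =====
-- buf = [c.lower() for c in s if c.isalnum()]
def pvBuf (s : String) : List Char :=
  (s.toList.filter (fun c => PySem.Chars.isalnum c)).map PySem.Chars.lowerChar

-- the while-loop of B: two converging indices, False on the first mismatch
def pvTwoPtr (buf : List Char) (i j : Nat) : Bool :=
  if _h : i < j then
    if buf.getD i ' ' ≠ buf.getD j ' ' then false
    else pvTwoPtr buf (i + 1) (j - 1)
  else true
termination_by j - i

def identify_palindromes_alt (lst : List String) : List String :=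
  lst.foldl (fun out s =>
    let buf := pvBuf s
    if pvTwoPtr buf 0 (buf.length - 1) then out ++ [s] else out) []

-- ===== PRECONDITION & SPEC =====
def Spec_identify_palindromes (lst : List String) (out : List String) : Prop := out = identify_palindromes_alt lst
instance (lst : List String) (out : List String) : Decidable (Spec_identify_palindromes lst out) := by unfold Spec_identify_palindromes; infer_instance

-- ===== CLAIM (what is proved, stated in full; the proofs are below) =====
def Claim_equal_identify_palindromes : Prop := ∀ (lst : List String), Dom_identify_palindromes lst → Spec_identify_palindromes lst (identify_palindromes lst)

-- ===== LEMMAS AND PROOFS =====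

-- the two-pointer loop checks exactly every mirrored pair inside [i, j]
theorem pvTwoPtr_iff (l : List Char) (n i j : Nat) (hn : j - i ≤ n) :
    pvTwoPtr l i j = true ↔
      ∀ a b : Nat, i ≤ a → a < b → b ≤ j → a + b = i + j → l.getD a ' ' = l.getD b ' ' := by
  induction n generalizing i j with
  | zero =>
    rw [pvTwoPtr]
    have hij : ¬ i < j := by omega
    simp only [hij, dite_false]
    constructor
    · intro _ a b ha hab hb hsum; omega
    · intro _; trivial
  | succ n ih =>
    rw [pvTwoPtr]
    by_cases hij : i < j
    · simp only [hij, dite_true]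
      by_cases heq : l.getD i ' ' = l.getD j ' '
      · simp only [heq, ne_eq, not_true_eq_false, if_false]
        rw [ih (i + 1) (j - 1) (by omega)]
        constructor
        · intro h a b ha hab hb hsum
          by_cases hai : a = i
          · have : b = j := by omega
            subst hai; subst this; exact heq
          · exact h a b (by omega) hab (by omega) (by omega)
        · intro h a b ha hab hb hsum
          exact h a b (by omega) hab (by omega) (by omega)
      · simp only [heq, ne_eq, not_false_eq_true, if_true]
        constructor
        · intro h; cases h
        · intro h; exact absurd (h i j (le_refl i) hij (le_refl j) rfl) heq
    · simp only [hij, dite_false]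
      constructor
      · intro _ a b ha hab hb hsum; omega
      · intro _; trivial

-- the two-pointer scan from the ends decides "l equals its reverse"
theorem pvTwoPtr_eq_reverse (l : List Char) :
    pvTwoPtr l 0 (l.length - 1) = true ↔ l = l.reverse := by
  rw [pvTwoPtr_iff l l.length 0 (l.length - 1) (by omega)]
  constructor
  · intro h
    apply List.ext_getElem (by simp)
    intro k hk hk'
    rw [List.getElem_reverse]
    rcases Nat.lt_trichotomy k (l.length - 1 - k) with hlt | heq | hgt
    · have := h k (l.length - 1 - k) (Nat.zero_le _) hlt (by omega) (by omega)
      rw [List.getD_eq_getElem _ _ hk, List.getD_eq_getElem _ _ (by omega)] at this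
      exact this
    · simp only [← heq]
    · have := h (l.length - 1 - k) k (Nat.zero_le _) hgt (by omega) (by omega)
      rw [List.getD_eq_getElem _ _ (by omega), List.getD_eq_getElem _ _ hk] at this
      exact this.symm
  · intro hrev a b _ hab hb hsum
    have hbl : b < l.length := by omega
    have hal : a < l.length := by omega
    conv_lhs => rw [hrev]
    rw [List.getD_eq_getElem _ _ (by simpa using hal), List.getElem_reverse,
        List.getD_eq_getElem _ _ hbl]
    have hidx : l.length - 1 - a = b := by omega
    simp only [hidx]

-- A's per-string test equals B's per-string test
theorem pvIsPalin_eq (s : String) :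
    pvIsPalinA s = pvTwoPtr (pvBuf s) 0 ((pvBuf s).length - 1) := by
  have hlow : (pvLow s).toList = pvBuf s := by
    rw [pvLow, PySem.Str.toList_lower]
    simp [PySem.Chars.lower, pvBuf]
  rcases h : pvTwoPtr (pvBuf s) 0 ((pvBuf s).length - 1) with _ | _
  · have hne : pvBuf s ≠ (pvBuf s).reverse := by
      intro hc
      rw [(pvTwoPtr_eq_reverse (pvBuf s)).mpr hc] at h
      cases h
    unfold pvIsPalinA
    rw [PySem.Str.slice?_none_none_neg_one]
    simp only [beq_eq_false_iff_ne, ne_eq, Option.some.injEq, ← String.toList_inj]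
    simp [hlow, hne]
  · have hrev := (pvTwoPtr_eq_reverse (pvBuf s)).mp h
    unfold pvIsPalinA
    rw [PySem.Str.slice?_none_none_neg_one]
    simp only [beq_iff_eq, Option.some.injEq, ← String.toList_inj]
    simp [hlow, ← hrev]

theorem pv_fold_eq (lst : List String) (acc : List String) :
    lst.foldl (fun palindromes s => if pvIsPalinA s then palindromes ++ [s] else palindromes) acc =
    lst.foldl (fun out s =>
      let buf := pvBuf s
      if pvTwoPtr buf 0 (buf.length - 1) then out ++ [s] else out) acc := by
  induction lst generalizing acc with
  | nil => rw [List.foldl_nil, List.foldl_nil]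
  | cons s t ih =>
    rw [List.foldl_cons, List.foldl_cons, ih]
    have : (if pvIsPalinA s then acc ++ [s] else acc) =
        (let buf := pvBuf s
         if pvTwoPtr buf 0 (buf.length - 1) then acc ++ [s] else acc) := by
      rw [pvIsPalin_eq s]
    rw [this]

-- ===== VERDICT (by name: the statement is the Claim_ definition above) =====
theorem identify_palindromes_spec : Claim_equal_identify_palindromes := by
  intro lst _
  unfold Spec_identify_palindromes identify_palindromes identify_palindromes_alt
  exact pv_fold_eq lst []
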